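-- pv_equiv track=rewrite | github.com/MrBrantCode/unitest_baseline | mut_generate/mist_train_cf/cf_89206/solution.py | sort_numbers
-- ===== SOURCE A (Python) =====
-- import math
--
-- def is_prime(n):
--     if n <= 1:
--         return False
--     if n == 2:
--         return True
--     if n % 2 == 0:
--         return False
--     sqrt_n = int(math.sqrt(n)) + 1
--     for i in range(3, sqrt_n, 2):
--         if n % i == 0:
--             return False
--     return True
--
-- def sort_numbers(numbers):
--     primes = []
--     non_primes = []
--     for num in numbers:
--         if is_prime(num):
--             primes.append(num)
--         else:
--             non_primes.append(num)
--     return sorted(primes, reverse=True) + sorted(non_primes, reverse=True)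
-- ===== SOURCE B (Python) =====
-- import math
--
-- def is_prime(n):
--     if n < 2:
--         return False
--     return all(n % d != 0 for d in range(2, math.isqrt(n) + 1))
--
-- def sort_numbers(numbers):
--     return sorted(numbers, key=lambda num: (not is_prime(num), -num))
-- ===== Notes on version B (the rewrite author's own statement) =====
-- stated objective: idiomatic
-- what changed: B replaces A's partition-into-two-lists-then-two-descending-sorts with a single sorted() call using the composite key (not is_prime(n), -n), and rewrites is_prime as 'n >= 2 and no divisor in range(2, isqrt(n)+1)' instead of A's special-cased odd-only scan.
import Mathlib
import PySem

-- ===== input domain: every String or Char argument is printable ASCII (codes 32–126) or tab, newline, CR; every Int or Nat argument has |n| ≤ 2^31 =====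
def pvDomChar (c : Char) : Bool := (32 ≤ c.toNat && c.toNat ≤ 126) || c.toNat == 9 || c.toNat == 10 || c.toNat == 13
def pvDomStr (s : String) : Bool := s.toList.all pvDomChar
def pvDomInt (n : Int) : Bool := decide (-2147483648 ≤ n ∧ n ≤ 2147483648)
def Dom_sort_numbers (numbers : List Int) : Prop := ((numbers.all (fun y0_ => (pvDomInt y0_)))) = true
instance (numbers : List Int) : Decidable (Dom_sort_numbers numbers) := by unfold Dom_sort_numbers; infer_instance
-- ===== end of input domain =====

-- B is one sorted() call with the composite key (not is_prime(n), -n) instead of A's partition into two lists followed by two descending sorts; is_prime is also restructured (all divisors in range(2, isqrt(n)+1) instead of A's odd-only scan).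


-- ===== PORT A =====
-- helper is_prime of Source A.
-- int(math.sqrt(n)) = Nat.sqrt n.toNat : exact for 0 ≤ n ≤ 2^31 (math.sqrt is correctly rounded and
-- the gap between sqrt of a non-square and the nearest integer exceeds the rounding error in this range).
def isPrime (n : Int) : Bool :=
  if n ≤ 1 then false
  else if n = 2 then true
  else if PySem.Int.mod n 2 = 0 then false
  else
    let sqrt_n : Int := (Nat.sqrt n.toNat : Int) + 1
    !((PySem.List.pyRange 3 sqrt_n 2).any (fun i => PySem.Int.mod n i == 0))

def sort_numbers (numbers : List Int) : List Int :=
  let pq :=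
    numbers.foldl
      (fun (acc : List Int × List Int) num =>
        if isPrime num then (acc.1 ++ [num], acc.2) else (acc.1, acc.2 ++ [num]))
      ([], [])
  PySem.List.sorted pq.1 (fun x => x) true ++ PySem.List.sorted pq.2 (fun x => x) true

-- ===== PORT B =====
-- Source B's is_prime: n >= 2 and all(n % d != 0 for d in range(2, math.isqrt(n) + 1));
-- math.isqrt n = Nat.sqrt n.toNat (exact).
def isPrimeAlt (n : Int) : Bool :=
  if n < 2 then false
  else (PySem.List.pyRange 2 ((Nat.sqrt n.toNat : Int) + 1) 1).all (fun d => !(PySem.Int.mod n d == 0))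

-- Source B: sorted(numbers, key=lambda num: (not is_prime(num), -num)); the tuple key is ported with sorted2.
def sort_numbers_alt (numbers : List Int) : List Int :=
  PySem.List.sorted2 numbers (fun num => !isPrimeAlt num) (fun num => -num) false

-- ===== PRECONDITION & SPEC =====
def Spec_sort_numbers (numbers : List Int) (out : List Int) : Prop := out = sort_numbers_alt numbers
instance (numbers : List Int) (out : List Int) : Decidable (Spec_sort_numbers numbers out) := by unfold Spec_sort_numbers; infer_instance

-- ===== CLAIM (what is proved, stated in full; the proofs are below) =====
def Claim_equal_sort_numbers : Prop := ∀ (numbers : List Int), Dom_sort_numbers numbers → Spec_sort_numbers numbers (sort_numbers numbers)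

-- ===== LEMMAS AND PROOFS =====

-- the two primality tests agree on every Int: for odd n > 2 no even d divides n, so
-- B's scan over 2..isqrt(n) finds a divisor exactly when A's scan over the odd 3..isqrt(n) does
theorem isPrime_eq_alt (n : Int) : isPrime n = isPrimeAlt n := by
  unfold isPrime isPrimeAlt
  by_cases h1 : n ≤ 1
  · simp [h1, show n < 2 by omega]
  · have h1' : ¬ n < 2 := by omega
    by_cases h2 : n = 2
    · subst h2
      rw [if_neg (by omega : ¬ (2:Int) ≤ 1), if_pos rfl, if_neg (by omega : ¬ (2:Int) < 2)]
      have : (Nat.sqrt (Int.toNat 2) : Int) + 1 = 2 := by norm_num [Int.toNat]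
      rw [this]
      rfl
    · have h3n : 3 ≤ n := by omega
      by_cases h3 : PySem.Int.mod n 2 = 0
      · -- even n ≥ 4: both sides false (2 itself is in B's range)
        have hdvd : (2:Int) ∣ n := (PySem.Int.mod_eq_zero_iff_dvd n 2).mp h3
        have h4 : 4 ≤ n := by omega
        have hs : 2 ≤ Nat.sqrt n.toNat := by
          have : 2 * 2 ≤ n.toNat := by omega
          exact Nat.le_sqrt.mpr this
        rw [if_neg h1, if_neg h2, if_pos h3, if_neg h1']
        symm
        rw [List.all_eq_false]
        refine ⟨2, ?_, by simp; exact hdvd⟩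
        rw [PySem.List.mem_pyRange_iff_of_pos (by norm_num)]
        refine ⟨by norm_num, by omega, by norm_num⟩
      · -- odd n ≥ 3
        have hodd : ¬ ((2:Int) ∣ n) := fun h => h3 ((PySem.Int.mod_eq_zero_iff_dvd n 2).mpr h)
        rw [if_neg h1, if_neg h2, if_neg h3, if_neg h1']
        simp only []
        have main : (∃ d ∈ PySem.List.pyRange 2 ((Nat.sqrt n.toNat : Int)+1) 1, PySem.Int.mod n d = 0)
            ↔ (∃ d ∈ PySem.List.pyRange 3 ((Nat.sqrt n.toNat : Int)+1) 2, PySem.Int.mod n d = 0) := by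
          constructor
          · rintro ⟨d, hd, hdvd⟩
            rw [PySem.List.mem_pyRange_iff_of_pos (by norm_num)] at hd
            have hdn : d ∣ n := (PySem.Int.mod_eq_zero_iff_dvd n d).mp hdvd
            have hd2 : ¬ ((2:Int) ∣ d) := fun h => hodd (h.trans hdn)
            refine ⟨d, ?_, hdvd⟩
            rw [PySem.List.mem_pyRange_iff_of_pos (by norm_num)]
            omega
          · rintro ⟨d, hd, hdvd⟩
            rw [PySem.List.mem_pyRange_iff_of_pos (by norm_num)] at hd
            refine ⟨d, ?_, hdvd⟩
            rw [PySem.List.mem_pyRange_iff_of_pos (by norm_num)]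
            omega
        by_cases hE : ∃ d ∈ PySem.List.pyRange 2 ((Nat.sqrt n.toNat : Int)+1) 1, PySem.Int.mod n d = 0
        · have hE2 := main.mp hE
          obtain ⟨d1, hm1, hv1⟩ := hE
          obtain ⟨d2, hm2, hv2⟩ := hE2
          have l : (PySem.List.pyRange 3 ((Nat.sqrt n.toNat : Int)+1) 2).any (fun i => PySem.Int.mod n i == 0) = true :=
            List.any_eq_true.mpr ⟨d2, hm2, by simp [hv2]⟩
          have r : (PySem.List.pyRange 2 ((Nat.sqrt n.toNat : Int)+1) 1).all (fun d => !(PySem.Int.mod n d == 0)) = false :=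
            List.all_eq_false.mpr ⟨d1, hm1, by simp [hv1]⟩
          rw [l, r]
          rfl
        · have hE2 : ¬ _ := fun h => hE (main.mpr h)
          have l : (PySem.List.pyRange 3 ((Nat.sqrt n.toNat : Int)+1) 2).any (fun i => PySem.Int.mod n i == 0) = false := by
            rw [List.any_eq_false]
            intro d hd
            simp only [beq_iff_eq]
            exact fun hv => hE2 ⟨d, hd, hv⟩
          have r : (PySem.List.pyRange 2 ((Nat.sqrt n.toNat : Int)+1) 1).all (fun d => !(PySem.Int.mod n d == 0)) = true := by
            rw [List.all_eq_true]
            intro d hd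
            simp only [Bool.not_eq_true', beq_eq_false_iff_ne, ne_eq]
            exact fun hv => hE ⟨d, hd, hv⟩
          rw [l, r]
          rfl

-- A's two-accumulator partition loop is a pair of filters
theorem partition_foldl (xs : List Int) :
    xs.foldl
      (fun (acc : List Int × List Int) num =>
        if isPrime num then (acc.1 ++ [num], acc.2) else (acc.1, acc.2 ++ [num]))
      ([], []) = (xs.filter (fun n => isPrime n), xs.filter (fun n => !isPrime n)) := by
  induction xs using List.reverseRecOn with
  | nil => simp
  | append_singleton t x ih =>
      simp only [List.foldl_append, List.foldl_cons, List.foldl_nil, ih, List.filter_append,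
        List.filter_cons, List.filter_nil]
      by_cases h : isPrime x <;> simp [h]

-- B's tuple key as a single injective key into the lexicographic product Bool ×ₗ Int
def lexKey (num : Int) : Bool ×ₗ Int := toLex (!isPrimeAlt num, -num)

theorem lexKey_injective : Function.Injective lexKey := by
  intro a b h
  have h2 := congrArg (fun x => (ofLex x).2) h
  simp [lexKey] at h2
  omega

-- sorted2's lexicographic comparison is exactly < on Bool ×ₗ Int
theorem sorted2_eq_sorted_lex (xs : List Int) :
    PySem.List.sorted2 xs (fun num => !isPrimeAlt num) (fun num => -num) false
      = PySem.List.sorted xs lexKey false := by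
  rw [PySem.List.sorted_eq_foldl_insertBy]
  unfold PySem.List.sorted2
  simp only [if_neg (by decide : ¬ (false = true))]
  congr 1
  funext acc x
  congr 1
  funext a b
  simp only [lexKey, Prod.Lex.toLex_lt_toLex]
  by_cases hA : isPrimeAlt a <;> by_cases hB : isPrimeAlt b <;>
    simp [hA, hB, Bool.lt_iff]

-- ===== VERDICT (by name: the statement is the Claim_ definition above) =====
theorem sort_numbers_spec : Claim_equal_sort_numbers := by
  intro numbers _
  unfold Spec_sort_numbers sort_numbers sort_numbers_alt
  rw [sorted2_eq_sorted_lex]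
  simp only [partition_foldl]
  set P := PySem.List.sorted (numbers.filter (fun n => isPrime n)) (fun x => x) true with hP
  set Q := PySem.List.sorted (numbers.filter (fun n => !isPrime n)) (fun x => x) true with hQ
  have hPmem : ∀ x ∈ P, isPrimeAlt x = true := by
    intro x hx
    rw [hP, PySem.List.mem_sorted] at hx
    rw [← isPrime_eq_alt]
    exact (List.mem_filter.mp hx).2
  have hQmem : ∀ x ∈ Q, isPrimeAlt x = false := by
    intro x hx
    rw [hQ, PySem.List.mem_sorted] at hx
    have := (List.mem_filter.mp hx).2
    rw [← isPrime_eq_alt]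
    simpa using this
  have hperm : (P ++ Q).Perm (PySem.List.sorted numbers lexKey false) := by
    refine ((PySem.List.sorted_perm _ _ _).append (PySem.List.sorted_perm _ _ _)).trans ?_
    exact (List.filter_append_perm _ numbers).trans (PySem.List.sorted_perm numbers lexKey false).symm
  refine PySem.List.eq_of_perm_of_pairwise_le_of_injective lexKey lexKey_injective hperm ?_ ?_
  · rw [List.pairwise_append]
    refine ⟨?_, ?_, ?_⟩
    · refine (PySem.List.sorted_pairwise_rev (numbers.filter (fun n => isPrime n)) (fun x => x)).imp_of_mem ?_
      intro a b ha hb hba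
      rw [lexKey, lexKey, Prod.Lex.toLex_le_toLex]
      right
      rw [hPmem a ha, hPmem b hb]
      exact ⟨rfl, by omega⟩
    · refine (PySem.List.sorted_pairwise_rev (numbers.filter (fun n => !isPrime n)) (fun x => x)).imp_of_mem ?_
      intro a b ha hb hba
      rw [lexKey, lexKey, Prod.Lex.toLex_le_toLex]
      right
      rw [hQmem a ha, hQmem b hb]
      exact ⟨rfl, by omega⟩
    · intro a ha b hb
      rw [lexKey, lexKey, Prod.Lex.toLex_le_toLex]
      rw [hPmem a ha, hQmem b hb]
      simp [Bool.lt_iff]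
  · exact PySem.List.sorted_pairwise numbers lexKey
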